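-- pv_equiv track=rewrite | github.com/mobri2a/aws-ops-automator | source/code/actions/rds_delete_instance_snapshot_action.py | custom_aggregation
-- ===== SOURCE A (Python) =====
-- PARAM_RETENTION_COUNT = "RetentionCount"
--
-- def custom_aggregation(resources, params, logger):
--
--     if params.get(PARAM_RETENTION_COUNT, 0) == 0:
--         yield resources
--     else:
--         snapshots_sorted_by_instanceid = sorted(resources, key=lambda k: k['DBInstanceIdentifier'])
--         db_instance_id = snapshots_sorted_by_instanceid[0]["DBInstanceIdentifier"] if len(
--             snapshots_sorted_by_instanceid) > 0 else None
--         snapshots_for_db_instance = []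
--         for snapshot in snapshots_sorted_by_instanceid:
--             if db_instance_id != snapshot["DBInstanceIdentifier"]:
--                 yield snapshots_for_db_instance
--                 db_instance_id = snapshot["DBInstanceIdentifier"]
--                 snapshots_for_db_instance = [snapshot]
--             else:
--                 snapshots_for_db_instance.append(snapshot)
--         yield snapshots_for_db_instance
-- ===== SOURCE B (Python) =====
-- PARAM_RETENTION_COUNT = "RetentionCount"
--
-- def custom_aggregation(resources, params, logger):
--     if params.get(PARAM_RETENTION_COUNT, 0) == 0:
--         yield resources
--         return
--     groups = {}
--     for snapshot in resources:
--         groups.setdefault(snapshot["DBInstanceIdentifier"], []).append(snapshot)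
--     for instance_id in sorted(groups):
--         yield groups[instance_id]
-- ===== Notes on version B (the rewrite author's own statement) =====
-- stated objective: alternative
-- what changed: B replaces A's full sort of all n snapshots followed by a consecutive-run scan with a single dict-grouping pass plus a sort of only the distinct DB instance ids.
-- intended difference: On an empty snapshot list with a nonzero RetentionCount, A yields one spurious empty group ([[]], an artefact of its trailing yield) while B yields no groups ([]), the intended result when there is nothing to group. — e.g. on custom_aggregation([], [("RetentionCount", 1)], none): A returns [[]], B returns []
import Mathlib
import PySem

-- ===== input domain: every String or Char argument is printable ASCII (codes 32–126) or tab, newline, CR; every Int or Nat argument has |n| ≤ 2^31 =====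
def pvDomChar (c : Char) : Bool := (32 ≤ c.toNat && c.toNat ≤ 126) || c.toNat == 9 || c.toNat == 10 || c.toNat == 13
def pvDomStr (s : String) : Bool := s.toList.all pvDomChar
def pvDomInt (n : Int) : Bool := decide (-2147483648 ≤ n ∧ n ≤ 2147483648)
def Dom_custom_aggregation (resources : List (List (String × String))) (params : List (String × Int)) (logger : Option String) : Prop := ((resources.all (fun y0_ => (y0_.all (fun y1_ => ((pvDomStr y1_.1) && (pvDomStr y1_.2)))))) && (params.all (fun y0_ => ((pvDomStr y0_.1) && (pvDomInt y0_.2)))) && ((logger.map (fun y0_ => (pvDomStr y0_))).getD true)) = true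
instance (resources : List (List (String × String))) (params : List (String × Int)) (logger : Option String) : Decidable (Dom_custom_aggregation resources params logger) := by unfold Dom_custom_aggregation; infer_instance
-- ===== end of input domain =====

-- B groups the snapshots with one dict pass and sorts only the distinct DB instance ids,
-- instead of sorting all n snapshots and scanning for runs as A does.
-- Both ports treat each snapshot dict and params as Python dicts (PySem.Dict.ofList: last
-- duplicate key wins), exact under Pre_ which guarantees the 'DBInstanceIdentifier' lookups succeed.

-- ===== PORT A =====
-- snapshot["DBInstanceIdentifier"]; total via getD "" — under Pre_ the key is present, so this equals the raising lookup
def pvDBId (r : List (String × String)) : String :=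
  (PySem.Dict.ofList r).getD "DBInstanceIdentifier" ""

-- A's for-loop: state (db_instance_id, snapshots_for_db_instance, yielded-so-far); final yield at []
def pvAgLoop : Option String → List (List (String × String)) → List (List (List (String × String))) → List (List (String × String)) → List (List (List (String × String)))
  | _, cur, acc, [] => acc ++ [cur]
  | dbid, cur, acc, snap :: rest =>
    if dbid ≠ some (pvDBId snap) then
      pvAgLoop (some (pvDBId snap)) [snap] (acc ++ [cur]) rest
    else
      pvAgLoop dbid (cur ++ [snap]) acc rest

def custom_aggregation (resources : List (List (String × String))) (params : List (String × Int)) (logger : Option String) : List (List (List (String × String))) :=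
  if (PySem.Dict.ofList params).getD "RetentionCount" 0 == 0 then
    [resources]
  else
    let s := PySem.List.sorted resources pvDBId false
    let dbid0 : Option String := match s with
      | [] => none
      | h :: _ => some (pvDBId h)
    pvAgLoop dbid0 [] [] s

-- ===== PORT B =====
def custom_aggregation_alt (resources : List (List (String × String))) (params : List (String × Int)) (logger : Option String) : List (List (List (String × String))) :=
  if (PySem.Dict.ofList params).getD "RetentionCount" 0 == 0 then
    [resources]
  else
    -- groups.setdefault(id, []).append(snapshot)  ==  modify with default []
    let groups := resources.foldl (fun d snap => d.modify (pvDBId snap) [] (· ++ [snap])) PySem.Dict.empty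
    (PySem.List.sorted groups.keys (fun x => x) false).map (fun k => groups.getD k [])

-- ===== PRECONDITION & SPEC =====
-- Pre_ excludes exactly the inputs where A raises KeyError: a nonzero RetentionCount together
-- with some snapshot lacking the 'DBInstanceIdentifier' key.
def Pre_custom_aggregation (resources : List (List (String × String))) (params : List (String × Int)) (logger : Option String) : Prop :=
  (PySem.Dict.ofList params).getD "RetentionCount" 0 = 0 ∨
    ∀ r ∈ resources, ((PySem.Dict.ofList r).get? "DBInstanceIdentifier").isSome
instance (resources : List (List (String × String))) (params : List (String × Int)) (logger : Option String) : Decidable (Pre_custom_aggregation resources params logger) := by unfold Pre_custom_aggregation; infer_instance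
def pvWitness_custom_aggregation : (List (List (String × String))) × (List (String × Int)) × Option String :=
  ([[("DBInstanceIdentifier", "db-a")], [("DBInstanceIdentifier", "db-b")]], [("RetentionCount", 2)], none)

-- On an empty snapshot list with a nonzero RetentionCount, A yields one spurious empty group
-- ([[]], an artefact of its trailing yield); B yields no groups ([]), the intended answer for
-- 'no snapshots means nothing to group'.
def D_custom_aggregation (resources : List (List (String × String))) (params : List (String × Int)) (logger : Option String) : Prop :=
  resources = [] ∧ ¬ (PySem.Dict.ofList params).getD "RetentionCount" 0 = 0
instance (resources : List (List (String × String))) (params : List (String × Int)) (logger : Option String) : Decidable (D_custom_aggregation resources params logger) := by unfold D_custom_aggregation; infer_instance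

def Spec_custom_aggregation (resources : List (List (String × String))) (params : List (String × Int)) (logger : Option String) (out : List (List (List (String × String)))) : Prop := ¬ D_custom_aggregation resources params logger → out = custom_aggregation_alt resources params logger
instance (resources : List (List (String × String))) (params : List (String × Int)) (logger : Option String) (out : List (List (List (String × String)))) : Decidable (Spec_custom_aggregation resources params logger out) := by unfold Spec_custom_aggregation; infer_instance

def pvDiffWitness_custom_aggregation : (List (List (String × String))) × (List (String × Int)) × Option String :=
  ([], [("RetentionCount", 1)], none)
def pvDiffWitnessOut_custom_aggregation : (List (List (List (String × String)))) × (List (List (List (String × String)))) :=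
  ([[]], [])

-- ===== CLAIM (what is proved, stated in full; the proofs are below) =====
def Claim_unchanged_custom_aggregation : Prop := ∀ (resources : List (List (String × String))) (params : List (String × Int)) (logger : Option String), Dom_custom_aggregation resources params logger → Pre_custom_aggregation resources params logger → Spec_custom_aggregation resources params logger (custom_aggregation resources params logger)
def Claim_changed_custom_aggregation : Prop := Dom_custom_aggregation (pvDiffWitness_custom_aggregation.1) (pvDiffWitness_custom_aggregation.2.1) (pvDiffWitness_custom_aggregation.2.2) ∧ Pre_custom_aggregation (pvDiffWitness_custom_aggregation.1) (pvDiffWitness_custom_aggregation.2.1) (pvDiffWitness_custom_aggregation.2.2) ∧ D_custom_aggregation (pvDiffWitness_custom_aggregation.1) (pvDiffWitness_custom_aggregation.2.1) (pvDiffWitness_custom_aggregation.2.2) ∧ custom_aggregation (pvDiffWitness_custom_aggregation.1) (pvDiffWitness_custom_aggregation.2.1) (pvDiffWitness_custom_aggregation.2.2) = pvDiffWitnessOut_custom_aggregation.1 ∧ custom_aggregation_alt (pvDiffWitness_custom_aggregation.1) (pvDiffWitness_custom_aggregation.2.1) (pvDiffWitness_custom_aggregation.2.2) = pvDiffWitnessOut_custom_aggregation.2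 ∧ pvDiffWitnessOut_custom_aggregation.1 ≠ pvDiffWitnessOut_custom_aggregation.2
def Claim_exact_custom_aggregation : Prop := ∀ (resources : List (List (String × String))) (params : List (String × Int)) (logger : Option String), Dom_custom_aggregation resources params logger → Pre_custom_aggregation resources params logger → D_custom_aggregation resources params logger → custom_aggregation resources params logger ≠ custom_aggregation_alt resources params logger

-- ===== LEMMAS AND PROOFS =====

-- first-occurrence distinct keys of a snapshot list
def pvDKeys : List (List (String × String)) → List String
  | [] => []
  | r :: t => pvDBId r :: (pvDKeys t).filter (fun x => !(x == pvDBId r))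

lemma mem_pvDKeys (s : List (List (String × String))) (x : String) :
    x ∈ pvDKeys s ↔ x ∈ s.map pvDBId := by
  induction s with
  | nil => simp [pvDKeys]
  | cons r t ih =>
    simp only [pvDKeys, List.mem_cons, List.mem_filter, List.map_cons, ih]
    by_cases h : x = pvDBId r <;> simp [h]

lemma nodup_pvDKeys (s : List (List (String × String))) : (pvDKeys s).Nodup := by
  induction s with
  | nil => simp [pvDKeys]
  | cons r t ih =>
    simp only [pvDKeys, List.nodup_cons]
    refine ⟨fun hmem => ?_, ih.filter _⟩
    have := (List.mem_filter.mp hmem).2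
    simp at this

lemma pairwise_lt_pvDKeys (s : List (List (String × String)))
    (hs : s.Pairwise (fun a b => pvDBId a ≤ pvDBId b)) :
    (pvDKeys s).Pairwise (· < ·) := by
  induction s with
  | nil => simp [pvDKeys]
  | cons r t ih =>
    rw [List.pairwise_cons] at hs
    simp only [pvDKeys, List.pairwise_cons]
    constructor
    · intro x hx
      have hxm := (List.mem_filter.mp hx).1
      have hxne := (List.mem_filter.mp hx).2
      simp only [ne_eq, Bool.not_eq_eq_eq_not, Bool.not_true, beq_eq_false_iff_ne] at hxne
      have hxmem := (mem_pvDKeys t x).mp hxm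
      obtain ⟨r', hr', rfl⟩ := List.mem_map.mp hxmem
      exact lt_of_le_of_ne (hs.1 r' hr') (Ne.symm hxne)
    · exact (ih hs.2).filter _

-- A's loop on a key-sorted list, below all of whose keys the current key k sits
lemma agLoop_eq (s : List (List (String × String))) :
    ∀ (k : String) (cur : List (List (String × String))) (acc : List (List (List (String × String)))),
    s.Pairwise (fun a b => pvDBId a ≤ pvDBId b) →
    (∀ r ∈ s, k ≤ pvDBId r) →
    pvAgLoop (some k) cur acc s =
      acc ++ (cur ++ s.filter (fun r => pvDBId r == k)) ::
        ((pvDKeys s).filter (fun x => !(x == k))).map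
          (fun k' => s.filter (fun r => pvDBId r == k')) := by
  induction s with
  | nil => intro k cur acc _ _; simp [pvAgLoop, pvDKeys]
  | cons r t ih =>
    intro k cur acc hs hle
    rw [List.pairwise_cons] at hs
    by_cases h : pvDBId r = k
    · -- same run continues
      have hcond : ¬ (some k ≠ some (pvDBId r)) := by simp [h]
      simp only [pvAgLoop, hcond, if_false]
      rw [ih k (cur ++ [r]) acc hs.2 (fun x hx => hle x (List.mem_cons_of_mem r hx))]
      have e1 : (r :: t).filter (fun r' => pvDBId r' == k) = r :: t.filter (fun r' => pvDBId r' == k) := by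
        simp [h]
      have e2 : (pvDKeys (r :: t)).filter (fun x => !(x == k))
          = (pvDKeys t).filter (fun x => !(x == k)) := by
        simp only [pvDKeys, h, List.filter_cons, beq_self_eq_true, Bool.not_true,
          Bool.false_eq_true, if_false, List.filter_filter]
        apply List.filter_congr
        intro x _
        cases (x == k) <;> rfl
      rw [e1, e2]
      congr 1
      congr 1
      · simp
      · apply List.map_congr_left
        intro k' hk'
        have hne : k' ≠ k := by
          have := (List.mem_filter.mp hk').2; simpa using this
        simp [h, hne.symm]
    · -- new run starts at r
      have hcond : (some k ≠ some (pvDBId r)) := by simp [Ne.symm h]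
      simp only [pvAgLoop]
      have hlt : ∀ x ∈ t, pvDBId r ≤ pvDBId x := hs.1
      have hklt : k < pvDBId r := lt_of_le_of_ne (hle r (List.mem_cons_self)) (Ne.symm h)
      rw [ih (pvDBId r) [r] (acc ++ [cur]) hs.2 hlt]
      have hgt : ∀ x ∈ pvDKeys t, (x == k) = false := by
        intro x hx
        obtain ⟨r', hr', rfl⟩ := List.mem_map.mp ((mem_pvDKeys t x).mp hx)
        have : k < pvDBId r' := lt_of_lt_of_le hklt (hlt r' hr')
        simp [ne_of_gt this]
      have f1 : (r :: t).filter (fun r' => pvDBId r' == k) = [] := by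
        rw [List.filter_eq_nil_iff]
        intro r' hr'
        rcases List.mem_cons.mp hr' with rfl | hmem
        · simp [h]
        · have : k < pvDBId r' := lt_of_lt_of_le hklt (hlt r' hmem)
          simp [ne_of_gt this]
      have f2 : (pvDKeys (r :: t)).filter (fun x => !(x == k))
          = pvDBId r :: (pvDKeys t).filter (fun x => !(x == pvDBId r)) := by
        have hrk : (!(pvDBId r == k)) = true := by simp [h]
        simp only [pvDKeys, List.filter_cons, hrk, if_true, List.filter_filter]
        congr 1
        apply List.filter_congr
        intro x hx
        rw [hgt x hx]
        cases (x == pvDBId r) <;> rfl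
      have f3 : (r :: t).filter (fun r' => pvDBId r' == pvDBId r)
          = r :: t.filter (fun r' => pvDBId r' == pvDBId r) := by
        simp
      have f4 : ∀ k' ∈ (pvDKeys t).filter (fun x => !(x == pvDBId r)),
          (r :: t).filter (fun r' => pvDBId r' == k') = t.filter (fun r' => pvDBId r' == k') := by
        intro k' hk'
        have hne : k' ≠ pvDBId r := by
          have := (List.mem_filter.mp hk').2; simpa using this
        simp [hne.symm]
      rw [f1, f2, if_pos hcond]
      rw [List.map_cons, f3]
      rw [List.map_congr_left f4]
      simp

-- stability of PySem's sort: filtering one key class commutes with sorting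
lemma filter_insertBy (x : List (String × String)) (ys : List (List (String × String))) (k : String)
    (hys : ys.Pairwise (fun a b => pvDBId a ≤ pvDBId b)) :
    (PySem.List.insertBy (fun a b => decide (pvDBId a < pvDBId b)) x ys).filter
        (fun r => pvDBId r == k)
      = ys.filter (fun r => pvDBId r == k) ++ if pvDBId x == k then [x] else [] := by
  induction ys with
  | nil => simp [PySem.List.insertBy, List.filter_cons]
  | cons y ys ih =>
    rw [List.pairwise_cons] at hys
    simp only [PySem.List.insertBy]
    by_cases hb : pvDBId x < pvDBId y
    · simp only [hb, if_true, decide_true, List.filter_cons]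
      by_cases hxk : pvDBId x = k
      · -- all of y :: ys has keys > k, so its filter is empty
        have hnil : (y :: ys).filter (fun r => pvDBId r == k) = [] := by
          rw [List.filter_eq_nil_iff]
          intro r hr
          have : pvDBId x < pvDBId r := by
            rcases List.mem_cons.mp hr with rfl | hmem
            · exact hb
            · exact lt_of_lt_of_le hb (hys.1 r hmem)
          rw [hxk] at this
          simp [ne_of_gt this]
        simp only [hxk, beq_self_eq_true, if_true]
        rw [List.filter_cons] at hnil
        rw [hnil]
        simp
      · have hx : (pvDBId x == k) = false := by simp [hxk]
        simp [hx]
    · simp only [hb, decide_false, Bool.false_eq_true, if_false, List.filter_cons]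
      rw [ih hys.2]
      split <;> simp
lemma filter_sorted (xs : List (List (String × String))) (k : String) :
    (PySem.List.sorted xs pvDBId false).filter (fun r => pvDBId r == k)
      = xs.filter (fun r => pvDBId r == k) := by
  induction xs using List.reverseRecOn with
  | nil => simp [(PySem.List.sorted_eq_nil_iff _ _ _).mpr rfl]
  | append_singleton xs x ih =>
    have hstep : PySem.List.sorted (xs ++ [x]) pvDBId false
        = PySem.List.insertBy (fun a b => decide (pvDBId a < pvDBId b)) x
            (PySem.List.sorted xs pvDBId false) := by
      rw [PySem.List.sorted_eq_foldl_insertBy, PySem.List.sorted_eq_foldl_insertBy,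
        List.foldl_append]
      rfl
    rw [hstep, filter_insertBy x _ k (PySem.List.sorted_pairwise xs pvDBId), ih,
      List.filter_append]
    simp [List.filter_cons]

-- B's dict of groups: values and keys
lemma groups_getD (resources : List (List (String × String))) (k : String) :
    (resources.foldl (fun d snap => d.modify (pvDBId snap) [] (· ++ [snap])) PySem.Dict.empty).getD k []
      = resources.filter (fun r => pvDBId r == k) := by
  have hmap : resources.foldl (fun d snap => d.modify (pvDBId snap) [] (· ++ [snap])) PySem.Dict.empty
      = (resources.map (fun r => (pvDBId r, r))).foldl
          (fun d p => d.modify p.1 [] (· ++ [p.2])) PySem.Dict.empty := by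
    rw [List.foldl_map]
  rw [hmap, PySem.Dict.getD_foldl_modify_append]
  simp [List.filter_map, Function.comp_def]

lemma groups_keys (resources : List (List (String × String))) :
    ∀ x, x ∈ (resources.foldl (fun d snap => d.modify (pvDBId snap) [] (· ++ [snap])) PySem.Dict.empty).keys
      ↔ x ∈ resources.map pvDBId := by
  intro x
  rw [PySem.Dict.keys_foldl_modify_key resources pvDBId [] (fun d snap v => v ++ [snap]) PySem.Dict.empty]
  rw [PySem.Set.mem_update]
  simp [PySem.Dict.keys_empty]

lemma groups_keys_nodup (resources : List (List (String × String))) :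
    (resources.foldl (fun d snap => d.modify (pvDBId snap) [] (· ++ [snap])) PySem.Dict.empty).keys.Nodup :=
  PySem.Dict.nodup_keys_foldl_modify_key resources pvDBId [] (fun d snap v => v ++ [snap])
    PySem.Dict.empty (by simp [PySem.Dict.keys_empty])

-- the sorted distinct keys B iterates over are exactly pvDKeys of A's sorted list
lemma sorted_keys_eq (resources : List (List (String × String))) :
    PySem.List.sorted
        (resources.foldl (fun d snap => d.modify (pvDBId snap) [] (· ++ [snap])) PySem.Dict.empty).keys
        (fun x => x) false
      = pvDKeys (PySem.List.sorted resources pvDBId false) := by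
  apply PySem.List.sorted_eq_of_perm_of_pairwise_lt
  · rw [List.perm_ext_iff_of_nodup (nodup_pvDKeys _) (groups_keys_nodup resources)]
    intro x
    rw [mem_pvDKeys, groups_keys]
    constructor
    · intro hx
      obtain ⟨r, hr, rfl⟩ := List.mem_map.mp hx
      exact List.mem_map.mpr ⟨r, (PySem.List.sorted_perm resources pvDBId false).mem_iff.mp hr, rfl⟩
    · intro hx
      obtain ⟨r, hr, rfl⟩ := List.mem_map.mp hx
      exact List.mem_map.mpr ⟨r, (PySem.List.sorted_perm resources pvDBId false).mem_iff.mpr hr, rfl⟩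
  · exact pairwise_lt_pvDKeys _ (PySem.List.sorted_pairwise resources pvDBId)

-- ===== VERDICT (by name: the statement is the Claim_ definition above) =====
theorem custom_aggregation_spec : Claim_unchanged_custom_aggregation := by
  intro resources params logger _ _ hnd
  unfold custom_aggregation custom_aggregation_alt
  by_cases hret : ((PySem.Dict.ofList params).getD "RetentionCount" 0 == 0) = true
  · simp only [hret, if_true]
  · simp only [hret]
    have hres : resources ≠ [] := by
      intro hnil
      exact hnd ⟨hnil, by simpa using hret⟩
    have hsnil : PySem.List.sorted resources pvDBId false ≠ [] := by
      simpa [PySem.List.sorted_eq_nil_iff] using hres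
    obtain ⟨h, t, hst⟩ := List.exists_cons_of_ne_nil hsnil
    rw [hst]
    have hpw : (h :: t).Pairwise (fun a b => pvDBId a ≤ pvDBId b) := by
      rw [← hst]; exact PySem.List.sorted_pairwise resources pvDBId
    have hle : ∀ r ∈ h :: t, pvDBId h ≤ pvDBId r := by
      intro r hr
      rcases List.mem_cons.mp hr with rfl | hmem
      · exact le_refl _
      · exact (List.pairwise_cons.mp hpw).1 r hmem
    rw [agLoop_eq (h :: t) (pvDBId h) [] [] hpw hle]
    rw [sorted_keys_eq resources, hst]
    simp only [pvDKeys, List.map_cons, List.nil_append, List.filter_cons, List.filter_filter]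
    have hsk : ∀ k, (PySem.List.sorted resources pvDBId false).filter (fun r => pvDBId r == k)
        = resources.filter (fun r => pvDBId r == k) := filter_sorted resources
    have hself : (!(pvDBId h == pvDBId h)) = false := by simp
    simp only [hself, Bool.false_eq_true, if_false]
    have hidem : ∀ x : String, (!(x == pvDBId h) && !(x == pvDBId h)) = (!(x == pvDBId h)) := by
      intro x; cases (x == pvDBId h) <;> rfl
    simp only [hidem]
    congr 1
    · rw [groups_getD, ← hsk, hst]
      simp
    · apply List.map_congr_left
      intro k hk
      have hne : k ≠ pvDBId h := by
        have := (List.mem_filter.mp hk).2; simpa using this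
      rw [groups_getD, ← hsk, hst]
      simp [hne.symm]

theorem custom_aggregation_changed : Claim_changed_custom_aggregation := by
  unfold Claim_changed_custom_aggregation; decide

theorem custom_aggregation_tight : Claim_exact_custom_aggregation := by
  intro resources params logger _ _ hd
  obtain ⟨rfl, hret⟩ := hd
  have hret' : ((PySem.Dict.ofList params).getD "RetentionCount" 0 == 0) = false := by
    simpa using hret
  unfold custom_aggregation custom_aggregation_alt
  have h1 : PySem.List.sorted ([] : List (List (String × String))) pvDBId false = [] :=
    (PySem.List.sorted_eq_nil_iff _ _ _).mpr rfl
  have h2 : PySem.List.sorted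
      (PySem.Dict.empty : PySem.Dict String (List (List (String × String)))).keys
      (fun x => x) false = [] :=
    (PySem.List.sorted_eq_nil_iff _ _ _).mpr PySem.Dict.keys_empty
  simp [hret', h1, pvAgLoop, List.foldl_nil]
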